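-- pv_equiv track=rewrite | github.com/smy37/Daily_Coding | Contest/supplement/1_3.py | check_limit
-- ===== SOURCE A (Python) =====
-- def check_limit(A):
--     limit = min(len(A), len(A[0]))
--     for i in range(len(A[0])):
--         temp = 0
--         t_max = 0
--         for j in range(len(A)):
--             if A[j][i] == ".":
--                 temp +=1
--             else:
--                 temp = 0
--             t_max = max(temp, t_max)
--         limit = min(limit, t_max)
--     return limit
-- ===== SOURCE B (Python) =====
-- def check_limit(A):
--     limit = min(len(A), len(A[0]))
--     for i in range(len(A[0])):
--         marks = ''.join('1' if row[i] == '.' else '0' for row in A)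
--         limit = min(limit, max(len(part) for part in marks.split('0')))
--     return limit
-- ===== Notes on version B (the rewrite author's own statement) =====
-- stated objective: idiomatic
-- what changed: Per column, the running temp/t_max counter pair is replaced by encoding the column as a '1'/'0' marker string and taking the max length of its split('0') segments; the index-based double loop over i,j becomes one pass over rows per column.
import Mathlib
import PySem

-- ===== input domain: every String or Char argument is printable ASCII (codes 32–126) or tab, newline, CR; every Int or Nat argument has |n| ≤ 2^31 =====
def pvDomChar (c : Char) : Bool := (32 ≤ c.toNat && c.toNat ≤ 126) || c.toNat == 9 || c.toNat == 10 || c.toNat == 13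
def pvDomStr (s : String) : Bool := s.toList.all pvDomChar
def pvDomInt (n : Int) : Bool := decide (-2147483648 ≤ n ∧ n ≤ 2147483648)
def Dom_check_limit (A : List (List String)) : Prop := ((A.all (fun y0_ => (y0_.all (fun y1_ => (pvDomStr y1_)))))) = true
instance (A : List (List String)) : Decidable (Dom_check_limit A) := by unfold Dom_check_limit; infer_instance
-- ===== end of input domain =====

-- B replaces A's per-column running temp/t_max counter pair by encoding each column as a
-- '1'/'0' marker list and taking the max length of its split-on-'0' segments (objective: idiomatic).

-- ===== PORT A =====
def check_limit (A : List (List String)) : Int :=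
  let limit0 : Int := min (A.length : Int) ((A.headD []).length : Int)
  (PySem.List.pyRange 0 ((A.headD []).length : Int) 1).foldl (fun limit i =>
    let st := (PySem.List.pyRange 0 (A.length : Int) 1).foldl
      (fun (st : Int × Int) j =>
        let temp : Int := if PySem.List.pyGetD (PySem.List.pyGetD A j []) i "" == "." then st.1 + 1 else 0
        (temp, max temp st.2)) ((0 : Int), (0 : Int))
    min limit st.2) limit0

-- ===== PORT B =====
-- Python's max(...) over the (always nonempty) list of nonnegative segment lengths is
-- ported as foldl max 0 over those lengths.
def check_limit_alt (A : List (List String)) : Int :=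
  let limit0 : Int := min (A.length : Int) ((A.headD []).length : Int)
  (PySem.List.pyRange 0 ((A.headD []).length : Int) 1).foldl (fun limit i =>
    let marks : List Char := A.map (fun row => if PySem.List.pyGetD row i "" == "." then '1' else '0')
    let best : Int := ((marks.splitOn '0').map (fun p => (p.length : Int))).foldl max 0
    min limit best) limit0

-- ===== PRECONDITION & SPEC =====
-- Pre_: exactly where Python A returns: A nonempty (A[0] is read) and every row at least
-- as long as row 0 (A[j][i] is read for every i < len(A[0])).
def Pre_check_limit (A : List (List String)) : Prop :=
  A ≠ [] ∧ ∀ row ∈ A, (A.headD []).length ≤ row.length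
instance (A : List (List String)) : Decidable (Pre_check_limit A) := by
  unfold Pre_check_limit; infer_instance
def pvWitness_check_limit : List (List String) := [[".", "x"], [".", "."]]

def Spec_check_limit (A : List (List String)) (out : Int) : Prop := out = check_limit_alt A
instance (A : List (List String)) (out : Int) : Decidable (Spec_check_limit A out) := by unfold Spec_check_limit; infer_instance

-- ===== CLAIM (what is proved, stated in full; the proofs are below) =====
def Claim_equal_check_limit : Prop := ∀ (A : List (List String)), Dom_check_limit A → Pre_check_limit A → Spec_check_limit A (check_limit A)

-- ===== LEMMAS AND PROOFS =====

-- max of the segment lengths of a list split on '0', and the length of its leading segment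
def pvBest (cs : List Char) : Nat := ((cs.splitOn '0').map List.length).foldl max 0
def pvHeadLen (cs : List Char) : Nat := ((cs.splitOn '0').headD []).length

lemma pv_foldl_max_max (L : List Nat) : ∀ a b, L.foldl max (max a b) = max a (L.foldl max b) := by
  induction L with
  | nil => intro a b; rfl
  | cons c t ih =>
    intro a b
    simp only [List.foldl_cons, Nat.max_assoc]
    exact ih a (max b c)

lemma pv_le_foldl_max (L : List Nat) (a : Nat) : a ≤ L.foldl max a := by
  have h := pv_foldl_max_max L a a
  rw [Nat.max_self] at h
  rw [h]
  exact Nat.le_max_left _ _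

lemma pv_splitOnP_ne_nil (p : Char → Bool) (cs : List Char) : cs.splitOnP p ≠ [] := by
  induction cs with
  | nil => rw [List.splitOnP_nil]; simp
  | cons c t ih =>
    rw [List.splitOnP_cons]
    split
    · simp
    · cases h : List.splitOnP p t with
      | nil => exact absurd h ih
      | cons x xs => simp [List.modifyHead]

lemma pv_splitOn_ne_nil (cs : List Char) : cs.splitOn '0' ≠ [] :=
  pv_splitOnP_ne_nil _ cs

lemma pv_splitOn_cons_head (cs h : List Char) (t : List (List Char))
    (hs : cs.splitOn '0' = h :: t) : ('1' :: cs).splitOn '0' = ('1' :: h) :: t := by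
  simp only [List.splitOn] at hs ⊢
  rw [List.splitOnP_cons, hs]
  rfl

lemma pvBest_cons_zero (cs : List Char) : pvBest ('0' :: cs) = pvBest cs := by
  simp [pvBest, List.splitOn, List.splitOnP_cons]

lemma pvHeadLen_cons_zero (cs : List Char) : pvHeadLen ('0' :: cs) = 0 := by
  simp [pvHeadLen, List.splitOn, List.splitOnP_cons]

lemma pvBest_cons_one (cs : List Char) :
    pvBest ('1' :: cs) = max (pvHeadLen cs + 1) (pvBest cs) := by
  obtain ⟨h, t, hs⟩ : ∃ h t, cs.splitOn '0' = h :: t := by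
    cases hx : cs.splitOn '0' with
    | nil => exact absurd hx (pv_splitOn_ne_nil cs)
    | cons h t => exact ⟨h, t, rfl⟩
  simp [pvBest, pvHeadLen, pv_splitOn_cons_head cs h t hs, hs]
  have h1 := pv_foldl_max_max (List.map List.length t) (h.length + 1) h.length
  rw [Nat.max_eq_left (Nat.le_succ _)] at h1
  exact h1

lemma pvHeadLen_cons_one (cs : List Char) : pvHeadLen ('1' :: cs) = pvHeadLen cs + 1 := by
  obtain ⟨h, t, hs⟩ : ∃ h t, cs.splitOn '0' = h :: t := by
    cases hx : cs.splitOn '0' with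
    | nil => exact absurd hx (pv_splitOn_ne_nil cs)
    | cons h t => exact ⟨h, t, rfl⟩
  simp [pvHeadLen, pv_splitOn_cons_head cs h t hs, hs]

lemma pvHeadLen_le_pvBest (cs : List Char) : pvHeadLen cs ≤ pvBest cs := by
  obtain ⟨h, t, hs⟩ : ∃ h t, cs.splitOn '0' = h :: t := by
    cases hx : cs.splitOn '0' with
    | nil => exact absurd hx (pv_splitOn_ne_nil cs)
    | cons h t => exact ⟨h, t, rfl⟩
  simp [pvHeadLen, pvBest, hs]
  exact le_trans (Nat.le_max_right 0 _) (pv_le_foldl_max _ _)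

-- A's inner scan (over the marker list) equals the split-based maximum
lemma pv_scan_eq (cs : List Char) (h01 : ∀ c ∈ cs, c = '0' ∨ c = '1') :
    ∀ temp tmax : Int, 0 ≤ temp → temp ≤ tmax →
    (cs.foldl (fun (st : Int × Int) c =>
        let t : Int := if c == '1' then st.1 + 1 else 0
        (t, max t st.2)) (temp, tmax)).2
      = max tmax (max (temp + (pvHeadLen cs : Int)) ((pvBest cs : Int))) := by
  induction cs with
  | nil =>
    intro temp tmax h0 hle
    simp only [List.foldl_nil]
    have h1 : pvHeadLen [] = 0 := by simp [pvHeadLen, List.splitOn, List.splitOnP_nil]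
    have h2 : pvBest [] = 0 := by simp [pvBest, List.splitOn, List.splitOnP_nil]
    rw [h1, h2]
    omega
  | cons c t ih =>
    intro temp tmax h0 hle
    rw [List.foldl_cons]
    rcases h01 c (List.mem_cons_self) with hc | hc <;> subst hc
    · -- '0' case: reset
      have e0 : (('0':Char) == '1') = false := by rfl
      simp only [e0, Bool.false_eq_true, if_false]
      have emax : max (0 : Int) tmax = tmax := by omega
      rw [emax, ih (fun c hc => h01 c (List.mem_cons_of_mem _ hc)) 0 tmax le_rfl (by omega)]
      rw [pvHeadLen_cons_zero, pvBest_cons_zero]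
      have hhb := pvHeadLen_le_pvBest t
      omega
    · -- '1' case: extend
      have e1 : (('1':Char) == '1') = true := by rfl
      simp only [e1, if_true]
      rw [ih (fun c hc => h01 c (List.mem_cons_of_mem _ hc)) (temp + 1) (max (temp + 1) tmax)
        (by omega) (by omega)]
      rw [pvHeadLen_cons_one, pvBest_cons_one]
      push_cast
      omega

lemma pv_cast_foldl_max (L : List Nat) : ∀ a : Nat,
    (L.map (fun n : Nat => (n : Int))).foldl max ((a : Nat) : Int) = ((L.foldl max a : Nat) : Int) := by
  induction L with
  | nil => intro a; rfl
  | cons c t ih =>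
    intro a
    simp only [List.map_cons, List.foldl_cons]
    rw [show max ((a : Nat) : Int) ((c : Nat) : Int) = ((max a c : Nat) : Int) by push_cast; rfl]
    exact ih (max a c)

-- per column: A's scan over the rows equals B's split-based maximum
lemma pv_column_eq (A : List (List String)) (i : Int) :
    ((PySem.List.pyRange 0 (A.length : Int) 1).foldl
      (fun (st : Int × Int) j =>
        let temp : Int := if PySem.List.pyGetD (PySem.List.pyGetD A j []) i "" == "." then st.1 + 1 else 0
        (temp, max temp st.2)) ((0 : Int), (0 : Int))).2
    = (((A.map (fun row => if PySem.List.pyGetD row i "" == "." then '1' else '0')).splitOn '0').map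
        (fun p => (p.length : Int))).foldl max 0 := by
  set g : List String → Char := fun row => if PySem.List.pyGetD row i "" == "." then '1' else '0' with hg
  set marks : List Char := A.map g with hmarks
  have hrw : (PySem.List.pyRange 0 (A.length : Int) 1).foldl
      (fun (st : Int × Int) j =>
        let temp : Int := if PySem.List.pyGetD (PySem.List.pyGetD A j []) i "" == "." then st.1 + 1 else 0
        (temp, max temp st.2)) ((0 : Int), (0 : Int))
      = A.foldl (fun (st : Int × Int) row =>
          let temp : Int := if PySem.List.pyGetD row i "" == "." then st.1 + 1 else 0
          (temp, max temp st.2)) ((0 : Int), (0 : Int)) :=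
    PySem.List.foldl_pyRange_zero_pyGetD' A []
      (fun (st : Int × Int) row =>
        let temp : Int := if PySem.List.pyGetD row i "" == "." then st.1 + 1 else 0
        (temp, max temp st.2)) ((0 : Int), (0 : Int))
  have hmap : marks.foldl (fun (st : Int × Int) c =>
        let t : Int := if c == '1' then st.1 + 1 else 0
        (t, max t st.2)) ((0 : Int), (0 : Int))
      = A.foldl (fun (st : Int × Int) row =>
          let temp : Int := if PySem.List.pyGetD row i "" == "." then st.1 + 1 else 0
          (temp, max temp st.2)) ((0 : Int), (0 : Int)) := by
    rw [hmarks, List.foldl_map]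
    apply PySem.List.foldl_congr_mem
    intro acc row _
    simp only [hg]
    by_cases hc : PySem.List.pyGetD row i "" == "."
    · simp [hc]
    · simp only [hc, if_false, Bool.false_eq_true]
      norm_num [show (('0':Char) == '1') = false from rfl]
  have h01 : ∀ c ∈ marks, c = '0' ∨ c = '1' := by
    intro c hc
    rw [hmarks] at hc
    obtain ⟨row, _, hrow⟩ := List.mem_map.mp hc
    rw [hg] at hrow
    dsimp only at hrow
    by_cases h : PySem.List.pyGetD row i "" == "."
    · rw [if_pos h] at hrow; right; exact hrow.symm
    · rw [if_neg h] at hrow; left; exact hrow.symm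
  have hscan := pv_scan_eq marks h01 0 0 le_rfl le_rfl
  rw [hrw, ← hmap, hscan]
  have hcast := pv_cast_foldl_max ((marks.splitOn '0').map List.length) 0
  rw [List.map_map] at hcast
  rw [show ((fun n : Nat => (n : Int)) ∘ List.length) = (fun p : List Char => (p.length : Int)) from rfl] at hcast
  rw [show ((0 : Nat) : Int) = (0 : Int) from rfl] at hcast
  rw [hcast]
  have hhb := pvHeadLen_le_pvBest marks
  have : ((marks.splitOn '0').map List.length).foldl max 0 = pvBest marks := rfl
  rw [this]
  omega

-- ===== VERDICT (by name: the statement is the Claim_ definition above) =====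
theorem check_limit_spec : Claim_equal_check_limit := by
  intro A _ _
  unfold Spec_check_limit check_limit check_limit_alt
  simp only []
  apply PySem.List.foldl_congr_mem
  intro limit i _
  rw [pv_column_eq A i]
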